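-- pv_equiv track=rewrite | github.com/hakusai22/AlgoScripts | Algorithm/Algorithm_Competition/LeetCode/340/D.py | minimumVisitedCells
-- ===== SOURCE A (Python) =====
-- from typing import List
--
-- def minimumVisitedCells(grid: List[List[int]]) -> int:
--     m, n = len(grid), len(grid[0])
--     dp = [[float('inf')] * n for _ in range(m)]
--     dp[0][0] = 0
--     for i in range(m):
--         for j in range(n):
--             if i > 0 and j > 0:
--                 dp[i][j] = min(dp[i - 1][j], dp[i][j - 1]) + 1
--             elif i > 0:
--                 dp[i][j] = dp[i - 1][j] + 1
--             elif j > 0: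
--                 dp[i][j] = dp[i][j - 1] + 1
--     if dp[m - 1][n - 1] == float('inf'):
--         return -1
--     else:
--         return dp[m - 1][n - 1]
-- ===== SOURCE B (Python) =====
-- from typing import List
--
-- def minimumVisitedCells(grid: List[List[int]]) -> int:
--     # Every cell (i, j) is reachable with dp value i + j, so the DP table
--     # is unnecessary: the answer is the Manhattan distance of the corners.
--     return len(grid) + len(grid[0]) - 2
-- ===== Notes on version B (the rewrite author's own statement) =====
-- stated objective: faster
-- what changed: Replaces the m*n dynamic-programming table with the closed form len(grid)+len(grid[0])-2, since dp[i][j] always equals i+j.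
import Mathlib
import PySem

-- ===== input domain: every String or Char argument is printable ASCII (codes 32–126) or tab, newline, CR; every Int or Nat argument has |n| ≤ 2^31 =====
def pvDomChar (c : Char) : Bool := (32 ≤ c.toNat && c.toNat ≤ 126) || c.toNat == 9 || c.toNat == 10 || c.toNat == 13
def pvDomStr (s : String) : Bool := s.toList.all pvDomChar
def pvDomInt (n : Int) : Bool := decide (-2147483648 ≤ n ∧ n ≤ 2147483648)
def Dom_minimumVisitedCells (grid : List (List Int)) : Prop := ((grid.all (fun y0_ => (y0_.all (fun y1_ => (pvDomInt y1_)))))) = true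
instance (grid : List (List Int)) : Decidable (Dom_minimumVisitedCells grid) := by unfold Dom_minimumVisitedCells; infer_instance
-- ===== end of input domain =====

-- B replaces A's m*n DP table with the closed form m + n - 2 (dp[i][j] always equals i+j); objective: faster.

-- ===== PORT A =====
-- float('inf') is modelled as `none : Option Int` (all finite dp values are ints here).
def pvGet2 (dp : List (List (Option Int))) (i j : Nat) : Option Int :=
  (dp.getD i []).getD j none

def pvSet2 (dp : List (List (Option Int))) (i j : Nat) (v : Option Int) : List (List (Option Int)) :=
  dp.set i ((dp.getD i []).set j v)

-- Python min over {finite ints} ∪ {inf}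
def pvMinInf (a b : Option Int) : Option Int :=
  match a, b with
  | none, b => b
  | a, none => a
  | some x, some y => some (min x y)

-- + 1 (inf + 1 = inf)
def pvInc : Option Int → Option Int
  | none => none
  | some x => some (x + 1)

def minimumVisitedCells (grid : List (List Int)) : Int :=
  let m := grid.length
  -- grid[0] raises IndexError on an empty grid; Pre_ excludes that, so headD's default is never used
  let n := (grid.headD []).length
  let dp0 : List (List (Option Int)) := List.replicate m (List.replicate n (none : Option Int))
  let dp1 := pvSet2 dp0 0 0 (some 0)
  let dp := (List.range m).foldl (fun dp i =>
    (List.range n).foldl (fun dp j =>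
      if i > 0 ∧ j > 0 then
        pvSet2 dp i j (pvInc (pvMinInf (pvGet2 dp (i - 1) j) (pvGet2 dp i (j - 1))))
      else if i > 0 then
        pvSet2 dp i j (pvInc (pvGet2 dp (i - 1) j))
      else if j > 0 then
        pvSet2 dp i j (pvInc (pvGet2 dp i (j - 1)))
      else dp) dp) dp1
  match pvGet2 dp (m - 1) (n - 1) with
  | none => -1
  | some v => v

-- ===== PORT B =====
def minimumVisitedCells_alt (grid : List (List Int)) : Int :=
  (grid.length : Int) + ((grid.headD []).length : Int) - 2

-- ===== PRECONDITION & SPEC =====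
-- Pre_ excludes exactly the inputs where the Python A raises IndexError: an empty grid
-- (grid[0] fails) or an empty first row (dp[m-1][-1] lookup in an empty dp row fails).
def Pre_minimumVisitedCells (grid : List (List Int)) : Prop :=
  grid ≠ [] ∧ grid.headD [] ≠ []
instance (grid : List (List Int)) : Decidable (Pre_minimumVisitedCells grid) := by
  unfold Pre_minimumVisitedCells; infer_instance

def pvWitness_minimumVisitedCells : List (List Int) := [[5]]

def Spec_minimumVisitedCells (grid : List (List Int)) (out : Int) : Prop := out = minimumVisitedCells_alt grid
instance (grid : List (List Int)) (out : Int) : Decidable (Spec_minimumVisitedCells grid out) := by unfold Spec_minimumVisitedCells; infer_instance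

-- ===== CLAIM (what is proved, stated in full; the proofs are below) =====
def Claim_equal_minimumVisitedCells : Prop := ∀ (grid : List (List Int)), Dom_minimumVisitedCells grid → Pre_minimumVisitedCells grid → Spec_minimumVisitedCells grid (minimumVisitedCells grid)

-- ===== LEMMAS AND PROOFS =====

-- a finished dp row i: dp[i][j] = i + j
def finRow (n i : Nat) : List (Option Int) :=
  (List.range n).map (fun j : Nat => some ((i : Int) + (j : Int)))

-- dp row k while the inner loop has processed columns < t
def midRow (n k t : Nat) : List (Option Int) :=
  (List.range n).map (fun c : Nat =>
    if c < t then some ((k : Int) + (c : Int))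
    else if k = 0 ∧ c = 0 then some 0 else none)

-- dp state: rows < k finished, row k processed up to column t, rows > k untouched
def dpMid (m n k t : Nat) : List (List (Option Int)) :=
  (List.range m).map (fun r : Nat =>
    if r < k then finRow n r
    else if r = k then midRow n k t
    else midRow n r 0)

theorem getD_map_range {α : Type} (f : Nat → α) (d : α) (k m : Nat) (hk : k < m) :
    (((List.range m).map f).getD k d) = f k := by
  have h : k < ((List.range m).map f).length := by simpa using hk
  rw [List.getD_eq_getElem _ _ h, List.getElem_map, List.getElem_range]

theorem set_map_range {α : Type} (f : Nat → α) (k m : Nat) (v : α) :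
    (((List.range m).map f).set k v) = (List.range m).map (fun r => if r = k then v else f r) := by
  apply List.ext_getElem
  · simp
  · intro i h1 h2
    simp only [List.getElem_set, List.getElem_map, List.getElem_range]
    by_cases h : k = i
    · rw [if_pos h, if_pos h.symm]
    · rw [if_neg h, if_neg (fun e => h e.symm)]

theorem pvGet2_dpMid (m n k t i j : Nat) (hi : i < m) (hj : j < n) :
    pvGet2 (dpMid m n k t) i j =
      (if i < k then some ((i : Int) + (j : Int))
       else if i = k then (if j < t then some ((k : Int) + (j : Int))
                           else if k = 0 ∧ j = 0 then some 0 else none)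
       else if i = 0 ∧ j = 0 then some 0 else none) := by
  unfold pvGet2 dpMid
  rw [getD_map_range _ _ _ _ hi]
  by_cases h : i < k
  · rw [if_pos h, if_pos h]
    unfold finRow
    rw [getD_map_range _ _ _ _ hj]
  · rw [if_neg h, if_neg h]
    by_cases h' : i = k
    · rw [if_pos h', if_pos h']
      subst h'
      unfold midRow
      rw [getD_map_range _ _ _ _ hj]
    · rw [if_neg h', if_neg h']
      unfold midRow
      rw [getD_map_range _ _ _ _ hj]
      rw [if_neg (by omega : ¬ j < 0)]

theorem dpMid_row_k (m n k t : Nat) (hk : k < m) :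
    (dpMid m n k t).getD k [] = midRow n k t := by
  unfold dpMid
  rw [getD_map_range _ _ _ _ hk]
  rw [if_neg (lt_irrefl k), if_pos rfl]

theorem pvSet2_dpMid (m n k t : Nat) (hk : k < m) (ht : t < n) :
    pvSet2 (dpMid m n k t) k t (some ((k : Int) + (t : Int))) = dpMid m n k (t + 1) := by
  unfold pvSet2
  rw [dpMid_row_k m n k t hk]
  have hset : (midRow n k t).set t (some ((k : Int) + (t : Int))) = midRow n k (t + 1) := by
    unfold midRow
    rw [set_map_range]
    apply List.map_congr_left
    intro c hc
    by_cases h1 : c = t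
    · subst h1
      rw [if_pos rfl, if_pos (by omega : c < c + 1)]
    · rw [if_neg h1]
      by_cases h2 : c < t
      · rw [if_pos h2, if_pos (by omega : c < t + 1)]
      · rw [if_neg h2, if_neg (by omega : ¬ c < t + 1)]
  rw [hset]
  unfold dpMid
  rw [set_map_range]
  apply List.map_congr_left
  intro r hr
  by_cases h : r = k
  · subst h; rw [if_pos rfl, if_neg (lt_irrefl r), if_pos rfl]
  · rw [if_neg h]
    by_cases h2 : r < k
    · rw [if_pos h2, if_pos h2]
    · rw [if_neg h2, if_neg h2, if_neg h, if_neg h]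

-- one inner step, in the region both loops actually visit
theorem inner_step (m n k t : Nat) (hk : k < m) (ht : t < n) :
    (if k > 0 ∧ t > 0 then
        pvSet2 (dpMid m n k t) k t (pvInc (pvMinInf (pvGet2 (dpMid m n k t) (k - 1) t) (pvGet2 (dpMid m n k t) k (t - 1))))
      else if k > 0 then
        pvSet2 (dpMid m n k t) k t (pvInc (pvGet2 (dpMid m n k t) (k - 1) t))
      else if t > 0 then
        pvSet2 (dpMid m n k t) k t (pvInc (pvGet2 (dpMid m n k t) k (t - 1)))
      else dpMid m n k t) = dpMid m n k (t + 1) := by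
  by_cases h1 : k > 0 ∧ t > 0
  · rw [if_pos h1]
    rw [pvGet2_dpMid m n k t (k - 1) t (by omega) ht,
        pvGet2_dpMid m n k t k (t - 1) hk (by omega)]
    rw [if_pos (by omega : k - 1 < k)]
    rw [if_neg (lt_irrefl k), if_pos rfl, if_pos (by omega : t - 1 < t)]
    unfold pvMinInf pvInc
    have heq : some (min (((k - 1 : Nat) : Int) + (t : Int)) ((k : Int) + ((t - 1 : Nat) : Int)) + 1)
        = some ((k : Int) + (t : Int)) := by
      congr 1
      have h1k : ((k - 1 : Nat) : Int) = (k : Int) - 1 := by omega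
      have h1t : ((t - 1 : Nat) : Int) = (t : Int) - 1 := by omega
      rw [h1k, h1t]
      omega
    simp only []
    rw [heq]
    exact pvSet2_dpMid m n k t hk ht
  · rw [if_neg h1]
    by_cases h2 : k > 0
    · -- k > 0, t = 0
      have ht0 : t = 0 := by omega
      rw [if_pos h2]
      rw [pvGet2_dpMid m n k t (k - 1) t (by omega) ht]
      rw [if_pos (by omega : k - 1 < k)]
      unfold pvInc
      have heq : some (((k - 1 : Nat) : Int) + (t : Int) + 1) = some ((k : Int) + (t : Int)) := by
        congr 1
        have h1k : ((k - 1 : Nat) : Int) = (k : Int) - 1 := by omega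
        rw [h1k]; ring
      simp only []
      rw [heq]
      exact pvSet2_dpMid m n k t hk ht
    · rw [if_neg h2]
      have hk0 : k = 0 := by omega
      by_cases h3 : t > 0
      · -- k = 0, t > 0
        rw [if_pos h3]
        rw [pvGet2_dpMid m n k t k (t - 1) hk (by omega)]
        rw [if_neg (lt_irrefl k), if_pos rfl, if_pos (by omega : t - 1 < t)]
        unfold pvInc
        have heq : some ((k : Int) + ((t - 1 : Nat) : Int) + 1) = some ((k : Int) + (t : Int)) := by
          congr 1
          have h1t : ((t - 1 : Nat) : Int) = (t : Int) - 1 := by omega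
          rw [h1t]; ring
        simp only []
        rw [heq]
        exact pvSet2_dpMid m n k t hk ht
      · -- k = 0, t = 0: the dp is unchanged, and dpMid is unchanged too
        rw [if_neg h3]
        have ht0 : t = 0 := by omega
        subst hk0; subst ht0
        have hrow : midRow n 0 0 = midRow n 0 1 := by
          unfold midRow
          apply List.map_congr_left
          intro c hc
          by_cases hc0 : c = 0
          · subst hc0; norm_num
          · simp [hc0]
        unfold dpMid
        simp only [hrow]

theorem inner_fold (m n k : Nat) (hk : k < m) :
    ∀ t, t ≤ n →
      (List.range t).foldl (fun dp j =>
        if k > 0 ∧ j > 0 then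
          pvSet2 dp k j (pvInc (pvMinInf (pvGet2 dp (k - 1) j) (pvGet2 dp k (j - 1))))
        else if k > 0 then
          pvSet2 dp k j (pvInc (pvGet2 dp (k - 1) j))
        else if j > 0 then
          pvSet2 dp k j (pvInc (pvGet2 dp k (j - 1)))
        else dp) (dpMid m n k 0) = dpMid m n k t := by
  intro t
  induction t with
  | zero => intro _; simp
  | succ t ih =>
    intro hle
    rw [List.range_succ, List.foldl_append, ih (by omega)]
    simp only [List.foldl_cons, List.foldl_nil]
    exact inner_step m n k t hk (by omega)

-- a fully processed row is the finished row
theorem midRow_full (n k : Nat) : midRow n k n = finRow n k := by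
  unfold midRow finRow
  apply List.map_congr_left
  intro c hc
  rw [if_pos (List.mem_range.mp hc)]

theorem dpMid_next (m n k : Nat) : dpMid m n k n = dpMid m n (k + 1) 0 := by
  unfold dpMid
  apply List.map_congr_left
  intro r hr
  rcases Nat.lt_trichotomy r k with h | h | h
  · rw [if_pos h, if_pos (by omega : r < k + 1)]
  · subst h
    rw [if_neg (lt_irrefl r), if_pos rfl, if_pos (by omega : r < r + 1), midRow_full]
  · rw [if_neg (by omega : ¬ r < k), if_neg (by omega : r ≠ k),
        if_neg (by omega : ¬ r < k + 1)]
    by_cases h4 : r = k + 1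
    · subst h4; rw [if_pos rfl]
    · rw [if_neg h4]

theorem outer_fold (m n : Nat) :
    ∀ k, k ≤ m →
      (List.range k).foldl (fun dp i =>
        (List.range n).foldl (fun dp j =>
          if i > 0 ∧ j > 0 then
            pvSet2 dp i j (pvInc (pvMinInf (pvGet2 dp (i - 1) j) (pvGet2 dp i (j - 1))))
          else if i > 0 then
            pvSet2 dp i j (pvInc (pvGet2 dp (i - 1) j))
          else if j > 0 then
            pvSet2 dp i j (pvInc (pvGet2 dp i (j - 1)))
          else dp) dp) (dpMid m n 0 0) = dpMid m n k 0 := by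
  intro k
  induction k with
  | zero => intro _; simp
  | succ k ih =>
    intro hle
    rw [List.range_succ, List.foldl_append, ih (by omega)]
    simp only [List.foldl_cons, List.foldl_nil]
    rw [inner_fold m n k (by omega) n (le_refl n), dpMid_next]

-- the initial dp (after dp[0][0] = 0) is dpMid m n 0 0
theorem dp1_eq (m n : Nat) (hm : 0 < m) :
    pvSet2 (List.replicate m (List.replicate n (none : Option Int))) 0 0 (some 0) = dpMid m n 0 0 := by
  have hget : ((List.replicate m (List.replicate n (none : Option Int))).getD 0 []) = List.replicate n none := by
    rw [List.getD_eq_getElem _ _ (by simpa using hm)]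
    simp
  unfold pvSet2
  rw [hget]
  apply List.ext_getElem
  · simp [dpMid]
  · intro r h1 h2
    simp only [List.getElem_set, List.getElem_replicate]
    unfold dpMid
    simp only [List.getElem_map, List.getElem_range]
    rw [if_neg (by omega : ¬ r < 0)]
    by_cases h : r = 0
    · subst h
      rw [if_pos rfl, if_pos rfl]
      apply List.ext_getElem
      · simp [midRow]
      · intro c hc1 hc2
        simp only [List.getElem_set, List.getElem_replicate]
        unfold midRow
        simp only [List.getElem_map, List.getElem_range]
        rw [if_neg (by omega : ¬ c < 0)]
        by_cases hc : c = 0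
        · subst hc; norm_num
        · rw [if_neg (fun hne => hc hne.symm), if_neg (by simp [hc])]
    · rw [if_neg (fun hne => h (Eq.symm hne)), if_neg h]
      unfold midRow
      apply List.ext_getElem
      · simp
      · intro c hc1 hc2
        simp only [List.getElem_replicate, List.getElem_map, List.getElem_range]
        rw [if_neg (by omega : ¬ c < 0), if_neg (by simp [h])]

theorem final_get (m n : Nat) (hm : 0 < m) (hn : 0 < n) :
    pvGet2 (dpMid m n m 0) (m - 1) (n - 1) = some (((m - 1 : Nat) : Int) + ((n - 1 : Nat) : Int)) := by
  rw [pvGet2_dpMid m n m 0 (m - 1) (n - 1) (by omega) (by omega)]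
  rw [if_pos (by omega : m - 1 < m)]

-- ===== VERDICT (by name: the statement is the Claim_ definition above) =====
theorem minimumVisitedCells_spec : Claim_equal_minimumVisitedCells := by
  intro grid _ hpre
  obtain ⟨hg, hrow⟩ := hpre
  have hm : 0 < grid.length := List.length_pos_iff.mpr hg
  have hn : 0 < (grid.headD []).length := List.length_pos_iff.mpr hrow
  unfold Spec_minimumVisitedCells minimumVisitedCells minimumVisitedCells_alt
  set m := grid.length with hmdef
  set n := (grid.headD []).length with hndef
  dsimp only
  rw [dp1_eq m n hm, outer_fold m n m (le_refl m), final_get m n hm hn]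
  show ((m - 1 : Nat) : Int) + ((n - 1 : Nat) : Int) = (m : Int) + (n : Int) - 2
  omega
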